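-- pv_equiv track=rewrite | github.com/nishtha932005/adaptive-learning-ai | backend/app/main.py | _ensure_unique_across_course
-- ===== SOURCE A (Python) =====
-- def _ensure_unique_across_course(chapter_titles: list[str], seen_titles: set[str]) -> list[str]:
--     unique_across_course: list[str] = []
--     for title in chapter_titles:
--         candidate = title
--         suffix = 2
--         while candidate.lower() in seen_titles:
--             candidate = f"{title} ({suffix})"
--             suffix += 1
--         seen_titles.add(candidate.lower())
--         unique_across_course.append(candidate)
--     return unique_across_course
-- ===== SOURCE B (Python) =====
-- def _ensure_unique_across_course(chapter_titles: list[str], seen_titles: set[str]) -> list[str]: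
--     # Amortized-linear variant: remember, per exact title, the next suffix to try,
--     # so repeated titles resume scanning instead of restarting from 2.
--     next_suffix: dict[str, int] = {}
--     out: list[str] = []
--     for title in chapter_titles:
--         if title.lower() not in seen_titles:
--             candidate = title
--         else:
--             k = next_suffix.get(title, 2)
--             while f"{title} ({k})".lower() in seen_titles:
--                 k += 1
--             candidate = f"{title} ({k})"
--             next_suffix[title] = k + 1
--         seen_titles.add(candidate.lower())
--         out.append(candidate)
--     return out
-- ===== Notes on version B (the rewrite author's own statement) =====
-- stated objective: faster
-- what changed: B keeps a dict mapping each title to the next suffix to try, so repeated titles resume the suffix scan where the previous occurrence stopped instead of restarting from 2 each time (A's quadratic rescan disappears); return value is identical and both mutate seen_titles identically.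
import Mathlib
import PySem

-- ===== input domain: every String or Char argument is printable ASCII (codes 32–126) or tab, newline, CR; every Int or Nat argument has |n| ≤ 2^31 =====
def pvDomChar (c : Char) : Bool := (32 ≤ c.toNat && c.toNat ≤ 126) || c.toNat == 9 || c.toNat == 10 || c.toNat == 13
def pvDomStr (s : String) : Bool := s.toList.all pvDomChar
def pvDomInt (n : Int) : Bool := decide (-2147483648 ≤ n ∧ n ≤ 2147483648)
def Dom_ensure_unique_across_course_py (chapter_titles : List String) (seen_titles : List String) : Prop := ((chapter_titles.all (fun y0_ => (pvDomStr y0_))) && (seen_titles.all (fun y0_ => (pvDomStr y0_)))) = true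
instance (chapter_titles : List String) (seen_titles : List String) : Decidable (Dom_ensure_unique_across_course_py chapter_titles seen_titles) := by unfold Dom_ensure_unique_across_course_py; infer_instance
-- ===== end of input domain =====

-- B caches, per title, the next numeric suffix to try, resuming the scan instead of
-- restarting it from 2 (faster in a timing run); both versions mutate the Python
-- set seen_titles in the same way, the equivalence proved here is about the return value.

-- ===== PORT A =====
-- f"{title} ({suffix})"
def pvCand (title : String) (suffix : Int) : String :=
  title ++ " (" ++ PySem.Int.toStr suffix ++ ")"

-- A's while loop: retry candidates title, "title (2)", "title (3)", … ;
-- the fuel (one more than the size of the seen set) is only a totality guard: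
-- among length+1 distinct candidates one is always free.
def pvAScan (seen : List String) (title : String) (candidate : String) (suffix : Int) : Nat → String
  | 0 => candidate
  | fuel+1 =>
    if PySem.Str.lower candidate ∈ seen then
      pvAScan seen title (pvCand title suffix) (suffix + 1) fuel
    else candidate

-- one iteration of A's for loop over (unique_across_course, seen_titles)
def pvAStep (st : List String × List String) (title : String) : List String × List String :=
  let candidate := pvAScan st.2 title title 2 (st.2.length + 1)
  (st.1 ++ [candidate], PySem.Set.add st.2 (PySem.Str.lower candidate))

def ensure_unique_across_course_py (chapter_titles : List String) (seen_titles : List String) : List String :=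
  (chapter_titles.foldl pvAStep ([], PySem.Set.ofList seen_titles)).1

-- ===== PORT B =====
-- Source B's while loop: scan suffixes upward from k (fuel again a totality guard)
def pvBScan (seen : List String) (title : String) (k : Int) : Nat → Int
  | 0 => k
  | fuel+1 =>
    if PySem.Str.lower (pvCand title k) ∈ seen then pvBScan seen title (k + 1) fuel else k

-- one iteration of Source B's for loop over ((out, seen_titles), next_suffix)
def pvBStep (st : (List String × List String) × PySem.Dict String Int) (title : String) :
    (List String × List String) × PySem.Dict String Int :=
  let seen := st.1.2
  if PySem.Str.lower title ∉ seen then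
    ((st.1.1 ++ [title], PySem.Set.add seen (PySem.Str.lower title)), st.2)
  else
    let k := pvBScan seen title (st.2.getD title 2) (seen.length + 1)
    let candidate := pvCand title k
    ((st.1.1 ++ [candidate], PySem.Set.add seen (PySem.Str.lower candidate)), st.2.insert title (k + 1))

def ensure_unique_across_course_py_alt (chapter_titles : List String) (seen_titles : List String) : List String :=
  ((chapter_titles.foldl pvBStep (([], PySem.Set.ofList seen_titles), PySem.Dict.empty)).1).1

-- ===== PRECONDITION & SPEC =====
def Spec_ensure_unique_across_course_py (chapter_titles : List String) (seen_titles : List String) (out : List String) : Prop := out = ensure_unique_across_course_py_alt chapter_titles seen_titles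
instance (chapter_titles : List String) (seen_titles : List String) (out : List String) : Decidable (Spec_ensure_unique_across_course_py chapter_titles seen_titles out) := by unfold Spec_ensure_unique_across_course_py; infer_instance

-- ===== CLAIM (what is proved, stated in full; the proofs are below) =====
def Claim_equal_ensure_unique_across_course_py : Prop := ∀ (chapter_titles : List String) (seen_titles : List String), Dom_ensure_unique_across_course_py chapter_titles seen_titles → Spec_ensure_unique_across_course_py chapter_titles seen_titles (ensure_unique_across_course_py chapter_titles seen_titles)

-- ===== LEMMAS AND PROOFS =====

/- Facts about decimal digit strings (`Nat.toDigits 10`): accumulator/fuel behaviour,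
   recurrence, injectivity, and that lowercasing fixes their characters. -/

theorem pv_tdc_acc : ∀ (f n : ℕ) (acc : List Char),
    Nat.toDigitsCore 10 f n acc = Nat.toDigitsCore 10 f n [] ++ acc := by
  intro f
  induction f with
  | zero => intro n acc; simp [Nat.toDigitsCore]
  | succ f ih =>
    intro n acc
    simp only [Nat.toDigitsCore]
    by_cases h : n / 10 = 0
    · simp [h]
    · simp only [h, if_false]
      rw [ih (n / 10) (Nat.digitChar (n % 10) :: acc), ih (n / 10) [Nat.digitChar (n % 10)]]
      simp

theorem pv_tdc_fuel : ∀ (n f f' : ℕ), n < f → n < f' →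
    Nat.toDigitsCore 10 f n [] = Nat.toDigitsCore 10 f' n [] := by
  intro n
  induction n using Nat.strong_induction_on with
  | _ n ih =>
    intro f f' hf hf'
    match f, f' with
    | fa+1, fb+1 =>
      simp only [Nat.toDigitsCore]
      by_cases h : n / 10 = 0
      · simp [h]
      · simp only [h, if_false]
        have h10 : 10 ≤ n := by
          by_contra hc
          exact h (Nat.div_eq_of_lt (by omega))
        have hlt : n / 10 < n := Nat.div_lt_self (by omega) (by omega)
        rw [pv_tdc_acc fa (n / 10), pv_tdc_acc fb (n / 10),
          ih (n / 10) hlt fa fb (by omega) (by omega)]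

theorem pv_g_lt (n : ℕ) (h : n < 10) : Nat.toDigits 10 n = [Nat.digitChar n] := by
  simp [Nat.toDigits, Nat.toDigitsCore, Nat.div_eq_of_lt h, Nat.mod_eq_of_lt h]

theorem pv_g_rec (n : ℕ) (h : 10 ≤ n) :
    Nat.toDigits 10 n = Nat.toDigits 10 (n / 10) ++ [Nat.digitChar (n % 10)] := by
  have h0 : ¬ n / 10 = 0 := by
    intro hc
    have := Nat.div_eq_of_lt (show n < 10 by omega)
    omega
  have hlt : n / 10 < n := Nat.div_lt_self (by omega) (by omega)
  simp only [Nat.toDigits, Nat.toDigitsCore, h0, if_false]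
  rw [pv_tdc_acc n (n / 10)]
  rw [pv_tdc_fuel (n / 10) n (n / 10 + 1) (by omega) (by omega)]
  simp only [Nat.toDigitsCore]

theorem pv_digitChar_toNat : ∀ d : ℕ, d < 10 → (Nat.digitChar d).toNat = 48 + d := by
  intro d hd
  interval_cases d <;> rfl

theorem pv_digitChar_lower : ∀ d : ℕ, d < 10 →
    PySem.Chars.lowerChar (Nat.digitChar d) = Nat.digitChar d := by
  intro d hd
  interval_cases d <;> rfl

theorem pv_g_ne_nil (n : ℕ) : Nat.toDigits 10 n ≠ [] := by
  by_cases h : n < 10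
  · rw [pv_g_lt n h]; simp
  · rw [pv_g_rec n (by omega)]; simp

theorem pv_g_inj : ∀ m m' : ℕ, Nat.toDigits 10 m = Nat.toDigits 10 m' → m = m' := by
  intro m
  induction m using Nat.strong_induction_on with
  | _ m ih =>
    intro m' h
    by_cases hm : m < 10 <;> by_cases hm' : m' < 10
    · rw [pv_g_lt m hm, pv_g_lt m' hm'] at h
      have := congrArg Char.toNat (List.singleton_injective h)
      rw [pv_digitChar_toNat m hm, pv_digitChar_toNat m' hm'] at this
      omega
    · rw [pv_g_lt m hm, pv_g_rec m' (by omega)] at h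
      have hlen := congrArg List.length h
      simp only [List.length_append, List.length_cons, List.length_nil] at hlen
      have := List.length_pos_of_ne_nil (pv_g_ne_nil (m' / 10))
      omega
    · rw [pv_g_rec m (by omega), pv_g_lt m' hm'] at h
      have hlen := congrArg List.length h
      simp only [List.length_append, List.length_cons, List.length_nil] at hlen
      have := List.length_pos_of_ne_nil (pv_g_ne_nil (m / 10))
      omega
    · rw [pv_g_rec m (by omega), pv_g_rec m' (by omega)] at h
      obtain ⟨h1, h2⟩ := List.append_inj' h rfl
      have hd := congrArg Char.toNat (List.singleton_injective h2)
      rw [pv_digitChar_toNat _ (Nat.mod_lt _ (by omega)),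
        pv_digitChar_toNat _ (Nat.mod_lt _ (by omega))] at hd
      have hq := ih (m / 10) (Nat.div_lt_self (by omega) (by omega)) (m' / 10) h1
      omega

theorem pv_g_digits : ∀ n : ℕ, ∀ c ∈ Nat.toDigits 10 n, PySem.Chars.lowerChar c = c := by
  intro n
  induction n using Nat.strong_induction_on with
  | _ n ih =>
    intro c hc
    by_cases h : n < 10
    · rw [pv_g_lt n h] at hc
      simp at hc
      rw [hc]; exact pv_digitChar_lower n h
    · rw [pv_g_rec n (by omega)] at hc
      rcases List.mem_append.mp hc with h1 | h2
      · exact ih (n / 10) (Nat.div_lt_self (by omega) (by omega)) c h1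
      · simp at h2
        rw [h2]; exact pv_digitChar_lower _ (Nat.mod_lt _ (by omega))

theorem pv_map_lower_g (n : ℕ) :
    (Nat.toDigits 10 n).map PySem.Chars.lowerChar = Nat.toDigits 10 n := by
  have := List.map_congr_left (f := PySem.Chars.lowerChar) (g := id) (l := Nat.toDigits 10 n)
    (fun a ha => pv_g_digits n a ha)
  simpa using this

theorem pv_toStr_toList (j : Int) (h : 0 ≤ j) :
    (PySem.Int.toStr j).toList = Nat.toDigits 10 j.toNat := by
  rw [PySem.Int.toList_toStr]
  simp [PySem.Int.toChars, not_lt.mpr h]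

theorem pv_lower_list (s : String) :
    (PySem.Str.lower s).toList = s.toList.map PySem.Chars.lowerChar := by
  rw [PySem.Str.toList_lower]; rfl

theorem pv_cand_list (title : String) (j : Int) (h : 0 ≤ j) :
    (PySem.Str.lower (pvCand title j)).toList
      = title.toList.map PySem.Chars.lowerChar
        ++ ([PySem.Chars.lowerChar ' ', PySem.Chars.lowerChar '(']
        ++ (Nat.toDigits 10 j.toNat ++ [PySem.Chars.lowerChar ')'])) := by
  rw [pv_lower_list]
  simp only [pvCand, String.toList_append, List.map_append, List.append_assoc]
  rw [pv_toStr_toList j h, pv_map_lower_g]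
  rfl

theorem pv_F_inj (title : String) (j j' : Int) (hj : 0 ≤ j) (hj' : 0 ≤ j')
    (h : PySem.Str.lower (pvCand title j) = PySem.Str.lower (pvCand title j')) : j = j' := by
  have hl := congrArg String.toList h
  rw [pv_cand_list title j hj, pv_cand_list title j' hj'] at hl
  have h1 := List.append_cancel_left hl
  have h2 := List.append_cancel_left h1
  have h3 := (List.append_inj' h2 rfl).1
  have := pv_g_inj _ _ h3
  omega

theorem pv_F_len (title : String) (j : Int) (hj : 0 ≤ j) :
    PySem.Str.lower (pvCand title j) ≠ PySem.Str.lower title := by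
  intro h
  have hl := congrArg (fun s => s.toList.length) h
  simp only [pv_cand_list title j hj, pv_lower_list, List.length_append, List.length_map,
    List.length_cons, List.length_nil] at hl
  have := List.length_pos_of_ne_nil (pv_g_ne_nil j.toNat)
  omega

/- Pigeonhole: if the lowered title is already taken, some suffix in [2, 1+|seen|] is free. -/
theorem pv_exists_free (seen : List String) (title : String)
    (hbase : PySem.Str.lower title ∈ seen) :
    ∃ j : ℤ, 2 ≤ j ∧ j ≤ 1 + (seen.length : ℤ) ∧ PySem.Str.lower (pvCand title j) ∉ seen := by
  by_contra hc
  push_neg at hc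
  have hsub : insert (PySem.Str.lower title)
      ((Finset.Icc (2 : ℤ) (1 + (seen.length : ℤ))).image
        (fun j => PySem.Str.lower (pvCand title j))) ⊆ seen.toFinset := by
    intro x hx
    rcases Finset.mem_insert.mp hx with h | h
    · subst h; exact List.mem_toFinset.mpr hbase
    · obtain ⟨j, hj, rfl⟩ := Finset.mem_image.mp h
      obtain ⟨hj1, hj2⟩ := Finset.mem_Icc.mp hj
      exact List.mem_toFinset.mpr (hc j hj1 hj2)
  have hinj : Set.InjOn (fun j => PySem.Str.lower (pvCand title j))
      ↑(Finset.Icc (2 : ℤ) (1 + (seen.length : ℤ))) := by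
    intro a ha b hb hab
    obtain ⟨ha1, _⟩ := Finset.mem_Icc.mp (Finset.mem_coe.mp ha)
    obtain ⟨hb1, _⟩ := Finset.mem_Icc.mp (Finset.mem_coe.mp hb)
    exact pv_F_inj title a b (by omega) (by omega) hab
  have hnotmem : PySem.Str.lower title ∉
      (Finset.Icc (2 : ℤ) (1 + (seen.length : ℤ))).image
        (fun j => PySem.Str.lower (pvCand title j)) := by
    intro hmem
    obtain ⟨j, hj, hje⟩ := Finset.mem_image.mp hmem
    obtain ⟨hj1, _⟩ := Finset.mem_Icc.mp hj
    exact pv_F_len title j (by omega) hje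
  have hcard1 : ((Finset.Icc (2 : ℤ) (1 + (seen.length : ℤ))).image
      (fun j => PySem.Str.lower (pvCand title j))).card = seen.length := by
    rw [Finset.card_image_of_injOn hinj, Int.card_Icc]
    omega
  have hcard : (insert (PySem.Str.lower title)
      ((Finset.Icc (2 : ℤ) (1 + (seen.length : ℤ))).image
        (fun j => PySem.Str.lower (pvCand title j)))).card = seen.length + 1 := by
    rw [Finset.card_insert_of_notMem hnotmem, hcard1]
  have h1 := Finset.card_le_card hsub
  have h2 := seen.toFinset_card_le
  omega

/- The least free suffix ≥ 2 (when the lowered title itself is taken). -/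
theorem pv_least (seen : List String) (title : String)
    (hbase : PySem.Str.lower title ∈ seen) :
    ∃ m : ℤ, 2 ≤ m ∧ m ≤ 1 + (seen.length : ℤ) ∧ PySem.Str.lower (pvCand title m) ∉ seen ∧
      ∀ j : ℤ, 2 ≤ j → j < m → PySem.Str.lower (pvCand title j) ∈ seen := by
  obtain ⟨j0, hj1, hj2, hj3⟩ := pv_exists_free seen title hbase
  have hne : ((Finset.Icc (2 : ℤ) (1 + (seen.length : ℤ))).filter
      (fun j => PySem.Str.lower (pvCand title j) ∉ seen)).Nonempty :=
    ⟨j0, Finset.mem_filter.mpr ⟨Finset.mem_Icc.mpr ⟨hj1, hj2⟩, hj3⟩⟩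
  have hmem := Finset.min'_mem _ hne
  rw [Finset.mem_filter, Finset.mem_Icc] at hmem
  refine ⟨Finset.min' _ hne, hmem.1.1, hmem.1.2, hmem.2, ?_⟩
  intro j h2j hjlt
  by_contra hP
  have hjT : j ∈ (Finset.Icc (2 : ℤ) (1 + (seen.length : ℤ))).filter
      (fun j => PySem.Str.lower (pvCand title j) ∉ seen) := by
    rw [Finset.mem_filter, Finset.mem_Icc]
    exact ⟨⟨h2j, by omega⟩, hP⟩
  have := Finset.min'_le _ j hjT
  omega

/- A's scan, after its first check, equals B's suffix scan. -/
theorem pv_aScan_bScan (seen : List String) (title : String) :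
    ∀ (f : ℕ) (s : Int), pvAScan seen title (pvCand title s) (s + 1) f
      = pvCand title (pvBScan seen title s f) := by
  intro f
  induction f with
  | zero => intro s; simp [pvAScan, pvBScan]
  | succ f ih =>
    intro s
    simp only [pvAScan, pvBScan]
    by_cases h : PySem.Str.lower (pvCand title s) ∈ seen
    · simp only [h, if_true]; exact ih (s + 1)
    · simp only [h, if_false]

/- B's scan finds the least free suffix when one lies within the fuel. -/
theorem pv_bScan_find (seen : List String) (title : String) :
    ∀ (f : ℕ) (s m : Int), s ≤ m → m < s + (f : ℤ) →
      PySem.Str.lower (pvCand title m) ∉ seen →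
      (∀ j : ℤ, s ≤ j → j < m → PySem.Str.lower (pvCand title j) ∈ seen) →
      pvBScan seen title s f = m := by
  intro f
  induction f with
  | zero => intro s m h1 h2 _ _; exfalso; push_cast at h2; omega
  | succ f ih =>
    intro s m h1 h2 hfree hleast
    simp only [pvBScan]
    by_cases h : PySem.Str.lower (pvCand title s) ∈ seen
    · simp only [h, if_true]
      have hsm : s ≠ m := by intro he; rw [he] at h; exact hfree h
      refine ih (s + 1) m (by omega) (by push_cast at h2 ⊢; omega) hfree ?_
      intro j hj1 hj2
      exact hleast j (by omega) hj2
    · simp only [h, if_false]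
      by_contra hne
      exact h (hleast s le_rfl (by omega))

/- Invariant carried by B's cache: every recorded value v for a title means all
   suffixes in [2, v) are already taken in the seen set. -/
def pvInv (seen : List String) (cache : PySem.Dict String Int) : Prop :=
  ∀ t v, cache.get? t = some v →
    2 ≤ v ∧ ∀ j : ℤ, 2 ≤ j → j < v → PySem.Str.lower (pvCand t j) ∈ seen

theorem pv_mem_add (s : List String) (x y : String) (h : y ∈ s) : y ∈ PySem.Set.add s x :=
  (PySem.Set.mem_add s x y).mpr (Or.inl h)

theorem pv_step (acc seen : List String) (cache : PySem.Dict String Int) (title : String)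
    (hInv : pvInv seen cache) :
    ∃ cache', pvBStep ((acc, seen), cache) title = (pvAStep (acc, seen) title, cache')
      ∧ pvInv (pvAStep (acc, seen) title).2 cache' := by
  by_cases hbase : PySem.Str.lower title ∈ seen
  · -- title taken: both compute the least free suffix m
    obtain ⟨m, h2m, hmlen, hmfree, hmleast⟩ := pv_least seen title hbase
    have hA : pvAScan seen title title 2 (seen.length + 1) = pvCand title m := by
      have h0 : pvAScan seen title title 2 (seen.length + 1)
          = pvAScan seen title (pvCand title 2) (2 + 1) seen.length := by
        simp only [pvAScan, hbase, if_true]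
      rw [h0, pv_aScan_bScan seen title seen.length 2,
        pv_bScan_find seen title seen.length 2 m h2m (by omega) hmfree
          (fun j hj1 hj2 => hmleast j hj1 hj2)]
    have hk0 : 2 ≤ cache.getD title 2 ∧
        ∀ j : ℤ, 2 ≤ j → j < cache.getD title 2 → PySem.Str.lower (pvCand title j) ∈ seen := by
      rcases hg : cache.get? title with _ | v
      · constructor
        · simp [PySem.Dict.getD, hg]
        · intro j hj1 hj2
          simp [PySem.Dict.getD, hg] at hj2
          omega
      · have := hInv title v hg
        simp [PySem.Dict.getD, hg]
        exact this
    have hk0m : cache.getD title 2 ≤ m := by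
      by_contra hc
      push_neg at hc
      exact hmfree (hk0.2 m h2m hc)
    have hB : pvBScan seen title (cache.getD title 2) (seen.length + 1) = m := by
      refine pv_bScan_find seen title (seen.length + 1) (cache.getD title 2) m hk0m
        (by push_cast; omega) hmfree ?_
      intro j hj1 hj2
      exact hmleast j (by omega) hj2
    refine ⟨cache.insert title (m + 1), ?_, ?_⟩
    · simp [pvBStep, pvAStep, hbase, hA, hB]
    · intro t v hget
      simp only [pvAStep, hA]
      by_cases ht : t = title
      · subst ht
        rw [PySem.Dict.get?_insert_self] at hget
        have hv : v = m + 1 := by injection hget with h; omega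
        subst hv
        refine ⟨by omega, ?_⟩
        intro j hj1 hj2
        by_cases hjm : j < m
        · exact pv_mem_add _ _ _ (hmleast j hj1 hjm)
        · have : j = m := by omega
          subst this
          exact (PySem.Set.mem_add _ _ _).mpr (Or.inr rfl)
      · rw [PySem.Dict.get?_insert_of_ne cache (m + 1) (fun h => ht h)] at hget
        obtain ⟨hv2, hmem⟩ := hInv t v hget
        exact ⟨hv2, fun j hj1 hj2 => pv_mem_add _ _ _ (hmem j hj1 hj2)⟩
  · -- title free: both return it unchanged
    have hA : pvAScan seen title title 2 (seen.length + 1) = title := by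
      simp only [pvAScan, hbase, if_false]
    refine ⟨cache, ?_, ?_⟩
    · simp [pvBStep, pvAStep, hbase, hA]
    · intro t v hget
      simp only [pvAStep, hA]
      obtain ⟨hv2, hmem⟩ := hInv t v hget
      exact ⟨hv2, fun j hj1 hj2 => pv_mem_add _ _ _ (hmem j hj1 hj2)⟩

theorem pv_fold : ∀ (titles : List String) (acc seen : List String)
    (cache : PySem.Dict String Int), pvInv seen cache →
    (titles.foldl pvBStep ((acc, seen), cache)).1 = titles.foldl pvAStep (acc, seen) := by
  intro titles
  induction titles with
  | nil => intro acc seen cache _; rfl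
  | cons t ts ih =>
    intro acc seen cache hInv
    obtain ⟨cache', he, hInv'⟩ := pv_step acc seen cache t hInv
    rcases hs : pvAStep (acc, seen) t with ⟨a', s'⟩
    rw [hs] at he hInv'
    simp only [List.foldl_cons, he, hs]
    exact ih a' s' cache' hInv'

theorem pv_inv_empty (seen : List String) : pvInv seen PySem.Dict.empty := by
  intro t v hget
  rw [PySem.Dict.get?_empty] at hget
  exact absurd hget (by simp)

-- ===== VERDICT (by name: the statement is the Claim_ definition above) =====
theorem ensure_unique_across_course_py_spec : Claim_equal_ensure_unique_across_course_py := by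
  intro chapter_titles seen_titles _
  unfold Spec_ensure_unique_across_course_py
  unfold ensure_unique_across_course_py ensure_unique_across_course_py_alt
  rw [pv_fold chapter_titles [] (PySem.Set.ofList seen_titles) PySem.Dict.empty
    (pv_inv_empty _)]
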